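-- pv_equiv track=rewrite | github.com/austral-prog/tp-6-loops-Janaan-Yapur | enumerate_list.py | enumerate_list
-- ===== SOURCE A (Python) =====
-- def enumerate_list(lst):
--     """
--     Dada una lista de strings, retorna una nueva lista donde cada elemento
--     tiene el formato "indice. valor". Los strings vacios se deben saltear
--     y no deben aparecer en la lista resultante.
--     El indice debe ser consecutivo (no el indice original).
--
--     Ejemplo: enumerate_list(["Red", "Green", "", "White"]) -> ["0. Red", "1. Green", "2. White"]
--     """
--     result = []
--     index = 0
--     for word in lst:
--         if word != "":
--             result.append(f"{index}. {word}")
--             index += 1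
--     return result
-- ===== SOURCE B (Python) =====
-- def enumerate_list(lst):
--     i = sum(w != "" for w in lst)
--     out = []
--     for word in reversed(lst):
--         if word != "":
--             i -= 1
--             out.append(f"{i}. {word}")
--     out.reverse()
--     return out
-- ===== Notes on version B (the rewrite author's own statement) =====
-- stated objective: alternative
-- what changed: Instead of A's single forward loop with an incrementing index counter, B first counts the non-empty strings, then traverses the list in reverse building the output back-to-front with a decrementing counter, and finally reverses the result.
import Mathlib
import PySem

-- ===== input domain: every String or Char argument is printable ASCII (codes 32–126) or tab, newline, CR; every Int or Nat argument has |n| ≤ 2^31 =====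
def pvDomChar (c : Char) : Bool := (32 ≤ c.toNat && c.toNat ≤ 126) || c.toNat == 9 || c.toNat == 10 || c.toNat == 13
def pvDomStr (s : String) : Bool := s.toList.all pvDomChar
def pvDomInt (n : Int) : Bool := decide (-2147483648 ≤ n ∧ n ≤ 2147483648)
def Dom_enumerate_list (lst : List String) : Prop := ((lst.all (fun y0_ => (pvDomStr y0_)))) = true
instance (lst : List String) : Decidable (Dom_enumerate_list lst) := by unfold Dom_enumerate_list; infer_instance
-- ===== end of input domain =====

-- B replaces A's forward loop with an incrementing counter by: count the non-empty strings,
-- then build the output back-to-front over the reversed list with a decrementing counter, then reverse.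

-- ===== PORT A =====
-- loop with accumulator (result, index), appending "index. word" for non-empty words
def enumerate_list (lst : List String) : List String :=
  (lst.foldl
    (fun (st : List String × Int) word =>
      if word ≠ "" then (st.1 ++ [PySem.Int.toStr st.2 ++ ". " ++ word], st.2 + 1) else st)
    ([], 0)).1

-- ===== PORT B =====
-- i = sum(w != "" for w in lst); loop over reversed(lst) decrementing i and appending; out.reverse()
def enumerate_list_alt (lst : List String) : List String :=
  let i0 : Int := lst.foldl (fun c w => if w ≠ "" then c + 1 else c) 0
  let st := lst.reverse.foldl
    (fun (st : Int × List String) word =>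
      if word ≠ "" then (st.1 - 1, st.2 ++ [PySem.Int.toStr (st.1 - 1) ++ ". " ++ word]) else st)
    (i0, [])
  st.2.reverse

-- ===== PRECONDITION & SPEC =====
def Spec_enumerate_list (lst : List String) (out : List String) : Prop := out = enumerate_list_alt lst
instance (lst : List String) (out : List String) : Decidable (Spec_enumerate_list lst out) := by unfold Spec_enumerate_list; infer_instance

-- ===== CLAIM =====
def Claim_equal_enumerate_list : Prop := ∀ (lst : List String), Dom_enumerate_list lst → Spec_enumerate_list lst (enumerate_list lst)

-- ===== LEMMAS AND PROOFS =====
-- straight-line specification both loops are reduced to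
def goSpec : List String → Int → List String
  | [], _ => []
  | w :: tail, i =>
    if w = "" then goSpec tail i
    else (PySem.Int.toStr i ++ ". " ++ w) :: goSpec tail (i + 1)

def countNE : List String → Int
  | [] => 0
  | w :: tail => (if w = "" then 0 else 1) + countNE tail

theorem countNE_foldl (lst : List String) (c : Int) :
    lst.foldl (fun c w => if w ≠ "" then c + 1 else c) c = c + countNE lst := by
  induction lst generalizing c with
  | nil => simp [countNE]
  | cons w ws ih =>
    rw [List.foldl_cons, ih]
    by_cases h : w = "" <;> simp [countNE, h, add_comm, add_left_comm]

theorem A_loop (lst : List String) (acc : List String) (i : Int) :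
    (lst.foldl
      (fun (st : List String × Int) word =>
        if word ≠ "" then (st.1 ++ [PySem.Int.toStr st.2 ++ ". " ++ word], st.2 + 1) else st)
      (acc, i)).1
    = acc ++ goSpec lst i := by
  induction lst generalizing acc i with
  | nil => simp [goSpec]
  | cons w ws ih =>
    by_cases h : w = ""
    · simpa [h, goSpec] using ih acc i
    · simpa [h, goSpec] using ih (acc ++ [PySem.Int.toStr i ++ ". " ++ w]) (i + 1)

theorem B_foldr (lst : List String) (j : Int) (out : List String) :
    lst.foldr
      (fun word (st : Int × List String) =>
        if word ≠ "" then (st.1 - 1, st.2 ++ [PySem.Int.toStr (st.1 - 1) ++ ". " ++ word]) else st)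
      (countNE lst + j, out)
    = (j, out ++ (goSpec lst j).reverse) := by
  induction lst generalizing j out with
  | nil => simp [countNE, goSpec]
  | cons w ws ih =>
    rw [List.foldr_cons]
    by_cases h : w = ""
    · rw [show countNE (w :: ws) + j = countNE ws + j by simp [countNE, h], ih j out]
      simp [h, goSpec]
    · rw [show countNE (w :: ws) + j = countNE ws + (j + 1) by simp [countNE, h]; ring,
        ih (j + 1) out]
      simp [h, goSpec]

theorem B_alt_eq (lst : List String) : enumerate_list_alt lst = goSpec lst 0 := by
  show ((lst.reverse.foldl
      (fun (st : Int × List String) word =>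
        if word ≠ "" then (st.1 - 1, st.2 ++ [PySem.Int.toStr (st.1 - 1) ++ ". " ++ word]) else st)
      (lst.foldl (fun c w => if w ≠ "" then c + 1 else c) 0, [])).2).reverse = goSpec lst 0
  rw [countNE_foldl lst 0, List.foldl_reverse]
  beta_reduce
  rw [show (0 : Int) + countNE lst = countNE lst + 0 from by ring, B_foldr lst 0 []]
  simp

theorem A_eq (lst : List String) : enumerate_list lst = goSpec lst 0 := by
  unfold enumerate_list
  simpa using A_loop lst [] 0

-- ===== VERDICT =====
theorem enumerate_list_spec : Claim_equal_enumerate_list := by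
  intro lst _
  unfold Spec_enumerate_list
  rw [A_eq, B_alt_eq]
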